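-- pv_equiv track=rewrite | github.com/yinyajun/Details-In-Recommendation | model/DeepWalk/preprocess.py | session_aggregation
-- ===== SOURCE A (Python) =====
-- def session_aggregation(data):
--     # data: [(session_id, item), (session_id, item)...]
--     # [(0, 2), (0, 3), (1, 5)] => [[2,3], [5]]
--     ret = []
--     sess = []
--     for i in range(len(data)):
--         if i > 0:
--             if data[i][0] != data[i - 1][0]:
--                 ret.append(sess)
--                 sess = []
--         sess.append(data[i][1])
--     ret.append(sess)  # 将最后一次的sess放入ret
--     ret = filter(lambda p: len(p) > 1, ret)  # 过滤掉session中只有一个item的session，它们不能提供图的边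
--     return ret
-- ===== SOURCE B (Python) =====
-- def session_aggregation(data):
--     # Run-splitting with two index pointers: find each maximal run of equal
--     # session ids, keep its items only when the run has length > 1.
--     ret = []
--     i = 0
--     n = len(data)
--     while i < n:
--         j = i
--         while j < n and data[j][0] == data[i][0]:
--             j += 1
--         if j - i > 1:
--             ret.append([item for _, item in data[i:j]])
--         i = j
--     return ret
-- ===== Notes on version B (the rewrite author's own statement) =====
-- stated objective: alternative
-- what changed: B splits the list into maximal runs with a two-pointer scan and keeps each run only if it has length > 1, instead of A's single pass comparing each index with the previous one, appending at boundaries and filtering afterwards; B returns a list rather than a lazy filter object (same materialized values).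
import Mathlib
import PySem

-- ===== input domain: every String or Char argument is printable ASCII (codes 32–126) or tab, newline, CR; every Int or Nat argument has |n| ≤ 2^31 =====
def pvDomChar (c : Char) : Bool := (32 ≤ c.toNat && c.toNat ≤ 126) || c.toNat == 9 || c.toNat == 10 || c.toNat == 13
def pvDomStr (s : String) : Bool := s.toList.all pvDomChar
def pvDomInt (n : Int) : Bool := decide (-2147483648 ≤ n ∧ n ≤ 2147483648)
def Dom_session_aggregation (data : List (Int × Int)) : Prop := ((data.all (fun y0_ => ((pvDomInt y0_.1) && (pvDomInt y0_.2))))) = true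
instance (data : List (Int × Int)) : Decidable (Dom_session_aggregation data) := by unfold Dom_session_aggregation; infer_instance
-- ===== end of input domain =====

-- B replaces A's previous-index comparison + post-filter with a two-pointer run split
-- that keeps only runs of length > 1 (alternative decomposition, same O(n) cost).
-- A returns a lazy filter object; the equivalence is about the materialized values.


-- ===== PORT A =====
-- the loop: 'prev' carries data[i-1] (none for i = 0); state is (ret, sess)
def pvALoop : List (Int × Int) → Option Int → List (List Int) → List Int → (List (List Int) × List Int)
  | [], _, ret, sess => (ret, sess)
  | (k, v) :: rest, prev, ret, sess =>
    let st :=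
      match prev with
      | none => (ret, sess)
      | some pk => if k ≠ pk then (ret ++ [sess], ([] : List Int)) else (ret, sess)
    pvALoop rest (some k) st.1 (st.2 ++ [v])

def session_aggregation (data : List (Int × Int)) : List (List Int) :=
  let st := pvALoop data none [] []
  (st.1 ++ [st.2]).filter (fun p => p.length > 1)

-- ===== PORT B =====
-- inner while: take the maximal run of keys equal to data[i][0]; outer while: recurse on the rest
def session_aggregation_alt : List (Int × Int) → List (List Int)
  | [] => []
  | (k, v) :: rest =>
    let run := v :: (rest.takeWhile (fun p => p.1 == k)).map Prod.snd
    let rest' := rest.dropWhile (fun p => p.1 == k)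
    if run.length > 1 then run :: session_aggregation_alt rest'
    else session_aggregation_alt rest'
  termination_by data => data.length
  decreasing_by
    all_goals
      have h := List.length_dropWhile_le (fun p => p.1 == k) rest
      simp only [List.length_cons]
      omega

-- ===== PRECONDITION & SPEC =====
def Spec_session_aggregation (data : List (Int × Int)) (out : List (List Int)) : Prop := out = session_aggregation_alt data
instance (data : List (Int × Int)) (out : List (List Int)) : Decidable (Spec_session_aggregation data out) := by unfold Spec_session_aggregation; infer_instance

-- ===== CLAIM (what is proved, stated in full; the proofs are below) =====
def Claim_equal_session_aggregation : Prop := ∀ (data : List (Int × Int)), Dom_session_aggregation data → Spec_session_aggregation data (session_aggregation data)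

-- ===== LEMMAS AND PROOFS =====

-- the sessions A's loop builds, written as a direct recursion (proof device)
def pvG : List (Int × Int) → Int → List Int → List (List Int)
  | [], _, sess => [sess]
  | (k, v) :: rest, pk, sess =>
    if k ≠ pk then sess :: pvG rest k [v] else pvG rest pk (sess ++ [v])

lemma pvALoop_eq_pvG (rest : List (Int × Int)) : ∀ (pk : Int) (ret : List (List Int)) (sess : List Int),
    (pvALoop rest (some pk) ret sess).1 ++ [(pvALoop rest (some pk) ret sess).2] = ret ++ pvG rest pk sess := by
  induction rest with
  | nil => intro pk ret sess; simp [pvALoop, pvG]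
  | cons hd tl ih =>
    intro pk ret sess
    obtain ⟨k, v⟩ := hd
    by_cases h : k = pk
    · subst h; simp [pvALoop, pvG, ih]
    · simp [pvALoop, pvG, h, ih, List.append_assoc]

-- pvG splits off the current run, then the runs of the remainder
lemma pvG_split (rest : List (Int × Int)) : ∀ (pk : Int) (sess : List Int),
    pvG rest pk sess =
      (sess ++ (rest.takeWhile (fun p => p.1 == pk)).map Prod.snd) ::
        (match rest.dropWhile (fun p => p.1 == pk) with
         | [] => []
         | (k, v) :: r => pvG r k [v]) := by
  induction rest with
  | nil => intro pk sess; simp [pvG]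
  | cons hd tl ih =>
    intro pk sess
    obtain ⟨k, v⟩ := hd
    by_cases h : k = pk
    · subst h
      have hb : ((k, v).1 == k) = true := by simp
      simp only [pvG, ne_eq, not_true_eq_false, if_false, List.takeWhile_cons, List.dropWhile_cons,
        hb, if_true, List.map_cons]
      rw [ih k (sess ++ [v])]
      simp
    · have hb : ((k, v).1 == pk) = false := by simpa using h
      simp [pvG, h, hb]

-- B equals the filtered runs of pvG started on the head
lemma alt_eq_filter_pvG (n : Nat) : ∀ (data : List (Int × Int)), data.length ≤ n → ∀ (k v : Int),
    session_aggregation_alt ((k, v) :: data) = (pvG data k [v]).filter (fun p => p.length > 1) := by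
  induction n with
  | zero =>
    intro data h k v
    have : data = [] := List.length_eq_zero_iff.mp (Nat.le_zero.mp h)
    subst this
    rw [session_aggregation_alt.eq_def]
    simp [pvG, List.filter, session_aggregation_alt.eq_def]
  | succ n ih =>
    intro data h k v
    rw [pvG_split]
    rw [session_aggregation_alt.eq_def]
    simp only
    cases hdrop : data.dropWhile (fun p => p.1 == k) with
    | nil =>
      simp [List.filter_cons, List.filter_nil, session_aggregation_alt.eq_def]
    | cons hd r =>
      obtain ⟨k', v'⟩ := hd
      have hr : r.length ≤ n := by
        have h1 : (data.dropWhile (fun p => p.1 == k)).length ≤ data.length :=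
          List.length_dropWhile_le _ _
        rw [hdrop] at h1
        simp only [List.length_cons] at h1
        omega
      rw [ih r hr k' v']
      simp [List.filter_cons]

-- ===== VERDICT (by name: the statement is the Claim_ definition above) =====
theorem session_aggregation_spec : Claim_equal_session_aggregation := by
  intro data _
  unfold Spec_session_aggregation session_aggregation
  cases data with
  | nil =>
    rw [session_aggregation_alt.eq_def]
    simp [pvALoop, List.filter]
  | cons hd tl =>
    obtain ⟨k, v⟩ := hd
    have h1 : pvALoop ((k, v) :: tl) none [] [] = pvALoop tl (some k) [] [v] := by
      simp [pvALoop]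
    have h2 := pvALoop_eq_pvG tl k [] [v]
    simp only [h1]
    rw [h2]
    simp only [List.nil_append]
    rw [← alt_eq_filter_pvG tl.length tl le_rfl k v]
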